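-- pv_equiv track=rewrite | github.com/aillear/AllOrNothing | 打表部分/check.py | is_quadruple
-- ===== SOURCE A (Python) =====
-- def is_quadruple(arr):
--     list = sorted(arr)
--     if len(list) < 4:
--         return 0
--     count = 1
--     for i in range(1, len(list)):
--         if list[i] == list[i - 1]:
--             count = count + 1
--         else:
--             count = 1
--         if count >= 4:
--             return 1
--     return 0
-- ===== SOURCE B (Python) =====
-- def is_quadruple(arr):
--     counts = {}
--     for x in arr:
--         c = counts.get(x, 0) + 1
--         if c >= 4:
--             return 1
--         counts[x] = c
--     return 0
-- ===== Notes on version B (the rewrite author's own statement) =====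
-- stated objective: alternative
-- what changed: B drops the sort-then-scan entirely and instead counts occurrences in one pass with a hash map, returning 1 as soon as some value's count reaches 4.
import Mathlib
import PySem

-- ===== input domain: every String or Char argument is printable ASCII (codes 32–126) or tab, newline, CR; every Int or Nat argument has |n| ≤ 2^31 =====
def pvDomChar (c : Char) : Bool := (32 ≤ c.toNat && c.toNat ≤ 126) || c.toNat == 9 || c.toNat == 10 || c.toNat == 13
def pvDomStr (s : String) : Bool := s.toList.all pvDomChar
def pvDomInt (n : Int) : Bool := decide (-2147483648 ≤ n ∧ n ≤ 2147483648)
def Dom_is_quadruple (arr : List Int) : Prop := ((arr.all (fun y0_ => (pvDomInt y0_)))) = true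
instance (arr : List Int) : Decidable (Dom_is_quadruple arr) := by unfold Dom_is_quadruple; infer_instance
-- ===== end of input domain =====

-- B drops A's sort-then-scan entirely: it counts occurrences in one pass with a dict
-- and returns 1 as soon as some value's count reaches 4.


-- ===== PORT A =====
-- the count update of A's loop body: count+1 on equality with the predecessor, reset to 1
def newCount (l : List Int) (i : Nat) (count : Int) : Int :=
  if l.getD i 0 == l.getD (i - 1) 0 then count + 1 else 1

-- A's for-loop over range(1, len) with the running count and early return 1
def isQuadLoopA (l : List Int) (i : Nat) (count : Int) : Int :=
  if _h : i < l.length then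
    if newCount l i count ≥ 4 then 1 else isQuadLoopA l (i + 1) (newCount l i count)
  else 0
termination_by l.length - i

def is_quadruple (arr : List Int) : Int :=
  let l := PySem.List.sorted arr (fun x => x) false
  if l.length < 4 then 0
  else isQuadLoopA l 1 1

-- ===== PORT B =====
-- B's single pass: counts.get(x, 0) + 1, early return 1 when the count reaches 4
def countLoopB (xs : List Int) (counts : PySem.Dict Int Int) : Int :=
  match xs with
  | [] => 0
  | x :: rest =>
    let c := counts.getD x 0 + 1
    if c ≥ 4 then 1 else countLoopB rest (counts.insert x c)

def is_quadruple_alt (arr : List Int) : Int :=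
  countLoopB arr PySem.Dict.empty

-- ===== PRECONDITION & SPEC =====
def Spec_is_quadruple (arr : List Int) (out : Int) : Prop := out = is_quadruple_alt arr
instance (arr : List Int) (out : Int) : Decidable (Spec_is_quadruple arr out) := by unfold Spec_is_quadruple; infer_instance

-- ===== CLAIM (what is proved, stated in full; the proofs are below) =====
def Claim_equal_is_quadruple : Prop := ∀ (arr : List Int), Dom_is_quadruple arr → Spec_is_quadruple arr (is_quadruple arr)

-- ===== LEMMAS AND PROOFS =====

-- a run of four equal consecutive entries starting at j
def RunAt (l : List Int) (j : Nat) : Prop :=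
  l.getD j 0 = l.getD (j + 1) 0 ∧ l.getD (j + 1) 0 = l.getD (j + 2) 0 ∧
    l.getD (j + 2) 0 = l.getD (j + 3) 0

theorem isQuadLoopA_zero_or_one (l : List Int) (i : Nat) (c : Int) :
    isQuadLoopA l i c = 0 ∨ isQuadLoopA l i c = 1 := by
  unfold isQuadLoopA
  split
  · split
    · right; rfl
    · exact isQuadLoopA_zero_or_one l (i + 1) _
  · left; rfl
termination_by l.length - i

theorem isQuadLoopA_eq_one (l : List Int) (s c : Nat) (hc1 : 1 ≤ c) (hc3 : c ≤ 3)
    (hrun : ∀ k, s ≤ k → k + 1 < s + c → l.getD k 0 = l.getD (k + 1) 0) :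
    isQuadLoopA l (s + c) (c : Int) = 1 ↔
      ∃ j, s ≤ j ∧ j + 3 < l.length ∧ RunAt l j := by
  unfold isQuadLoopA
  split
  case isTrue h =>
    unfold newCount
    split
    case isTrue heq =>
      simp only [beq_iff_eq] at heq
      have heq' : l.getD (s + c) 0 = l.getD (s + c - 1) 0 := heq
      have hrun' : ∀ k, s ≤ k → k + 1 < s + (c + 1) → l.getD k 0 = l.getD (k + 1) 0 := by
        intro k hk hk2
        rcases Nat.lt_or_ge (k + 1) (s + c) with h' | h'
        · exact hrun k hk h'
        · have hks : k = s + c - 1 := by omega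
          subst hks
          have he2 : s + c - 1 + 1 = s + c := by omega
          rw [he2]; exact heq'.symm
      by_cases h4 : (c : Int) + 1 ≥ 4
      · have hc : c = 3 := by omega
        subst hc
        rw [if_pos h4]
        refine iff_of_true rfl ⟨s, le_refl s, by omega, ?_, ?_, ?_⟩
        · exact hrun s (le_refl s) (by omega)
        · exact hrun (s + 1) (by omega) (by omega)
        · have h3 := hrun' (s + 2) (by omega) (by omega)
          have he3 : s + 2 + 1 = s + 3 := by omega
          rw [he3] at h3; exact h3
      · rw [if_neg h4]
        have hstep : (c : Int) + 1 = ((c + 1 : Nat) : Int) := by push_cast; ring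
        have harg : s + c + 1 = s + (c + 1) := by omega
        rw [hstep, harg,
          isQuadLoopA_eq_one l s (c + 1) (by omega) (by omega) hrun']
    case isFalse hne =>
      simp only [beq_iff_eq] at hne
      have hne' : l.getD (s + c) 0 ≠ l.getD (s + c - 1) 0 := hne
      have h1 : ¬ ((1 : Int) ≥ 4) := by decide
      rw [if_neg h1]
      have hrec := isQuadLoopA_eq_one l (s + c) 1 (le_refl 1) (by omega)
        (by intro k hk hk2; omega)
      rw [Nat.cast_one] at hrec
      rw [hrec]
      constructor
      · rintro ⟨j, hj, hb, hr⟩; exact ⟨j, by omega, hb, hr⟩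
      · rintro ⟨j, hj, hb, hr⟩
        refine ⟨j, ?_, hb, hr⟩
        by_contra hlt
        have hlt' : j < s + c := by omega
        obtain ⟨e1, e2, e3⟩ := hr
        apply hne'
        clear hlt
        rcases (by omega : s + c - 1 = j ∨ s + c - 1 = j + 1 ∨ s + c - 1 = j + 2) with h' | h' | h'
        · have hsc : s + c = j + 1 := by omega
          have hx : j + 1 - 1 = j := by omega
          rw [hsc, hx]; exact e1.symm
        · have hsc : s + c = j + 2 := by omega
          have hx : j + 2 - 1 = j + 1 := by omega
          rw [hsc, hx]; exact e2.symm
        · have hsc : s + c = j + 3 := by omega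
          have hx : j + 3 - 1 = j + 2 := by omega
          rw [hsc, hx]; exact e3.symm
  case isFalse h =>
    constructor
    · intro h1; exact absurd h1 (by decide)
    · rintro ⟨j, hj, hb, _⟩; omega
termination_by l.length - (s + c)

-- B's loop: 0 or 1
theorem countLoopB_zero_or_one (xs : List Int) (d : PySem.Dict Int Int) :
    countLoopB xs d = 0 ∨ countLoopB xs d = 1 := by
  induction xs generalizing d with
  | nil => left; rfl
  | cons x rest ih =>
    show (if d.getD x 0 + 1 ≥ 4 then (1:Int) else countLoopB rest (d.insert x (d.getD x 0 + 1))) = 0 ∨ (if d.getD x 0 + 1 ≥ 4 then (1:Int) else countLoopB rest (d.insert x (d.getD x 0 + 1))) = 1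
    split
    · right; rfl
    · exact ih _

-- B's loop invariant: it returns 1 iff stored count + remaining count reaches 4
theorem countLoopB_eq_one (xs : List Int) (d : PySem.Dict Int Int)
    (hinv : ∀ v, d.getD v 0 ≤ 3) :
    countLoopB xs d = 1 ↔ ∃ v, 4 ≤ d.getD v 0 + (xs.count v : Int) := by
  induction xs generalizing d with
  | nil =>
    simp only [countLoopB, List.count_nil]
    constructor
    · intro h; exact absurd h (by decide)
    · rintro ⟨v, hv⟩; have := hinv v; omega
  | cons x rest ih =>
    show (if d.getD x 0 + 1 ≥ 4 then (1:Int) else countLoopB rest (d.insert x (d.getD x 0 + 1))) = 1 ↔ _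
    split
    case isTrue h4 =>
      refine iff_of_true rfl ⟨x, ?_⟩
      have hcnt : (1 : Int) ≤ ((x :: rest).count x : Int) := by
        simp [List.count_cons_self]
      omega
    case isFalse h4 =>
      have hinv' : ∀ v, (d.insert x (d.getD x 0 + 1)).getD v 0 ≤ 3 := by
        intro v
        rw [PySem.Dict.getD_insert]
        split
        · omega
        · exact hinv v
      rw [ih _ hinv']
      constructor
      · rintro ⟨v, hv⟩
        rw [PySem.Dict.getD_insert] at hv
        refine ⟨v, ?_⟩
        by_cases hvx : v = x
        · subst hvx
          rw [if_pos rfl] at hv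
          simp only [List.count_cons_self]
          push_cast
          omega
        · rw [if_neg hvx] at hv
          rw [List.count_cons_of_ne (show x ≠ v from fun h => hvx h.symm)]
          omega
      · rintro ⟨v, hv⟩
        refine ⟨v, ?_⟩
        rw [PySem.Dict.getD_insert]
        by_cases hvx : v = x
        · subst hvx
          simp only [List.count_cons_self] at hv
          rw [if_pos rfl]
          push_cast at hv
          omega
        · rw [List.count_cons_of_ne (show x ≠ v from fun h => hvx h.symm)] at hv
          rw [if_neg hvx]
          omega

-- a run of four in a list forces a count ≥ 4
theorem count_of_run (l : List Int) (j : Nat) (hb : j + 3 < l.length) (hr : RunAt l j) :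
    ∃ v, 4 ≤ l.count v := by
  obtain ⟨e1, e2, e3⟩ := hr
  refine ⟨l.getD j 0, ?_⟩
  have hdrop : l.drop j = l.getD j 0 :: l.getD (j+1) 0 :: l.getD (j+2) 0 :: l.getD (j+3) 0 :: l.drop (j+4) := by
    rw [List.getD_eq_getElem l 0 (by omega), List.getD_eq_getElem l 0 (by omega),
        List.getD_eq_getElem l 0 (by omega), List.getD_eq_getElem l 0 hb]
    rw [List.drop_eq_getElem_cons (by omega)]
    congr 1
    rw [List.drop_eq_getElem_cons (by omega)]
    congr 1
    rw [List.drop_eq_getElem_cons (by omega)]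
    congr 1
    rw [List.drop_eq_getElem_cons (by omega)]
  have hle : (l.drop j).count (l.getD j 0) ≤ l.count (l.getD j 0) :=
    (List.drop_sublist j l).count_le _
  rw [hdrop, ← e1, ← (e1.trans e2), ← ((e1.trans e2).trans e3)] at hle
  simp only [List.count_cons, BEq.rfl, if_pos] at hle
  omega

-- in a sorted list whose elements are all ≥ v, the first k entries are v whenever count v ≥ k
theorem take_eq_replicate_of_count (k : Nat) (l : List Int) (v : Int)
    (hp : l.Pairwise (· ≤ ·)) (hge : ∀ y ∈ l, v ≤ y) (hc : k ≤ l.count v) :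
    l.take k = List.replicate k v := by
  induction k generalizing l with
  | zero => simp
  | succ k ih =>
    cases l with
    | nil => simp at hc
    | cons a t =>
      have hav : a = v := by
        by_contra hne
        have hva : v < a := lt_of_le_of_ne (hge a (List.mem_cons_self)) (Ne.symm hne)
        have : (a :: t).count v = 0 := by
          rw [List.count_eq_zero]
          intro hmem
          rcases List.mem_cons.mp hmem with h | h
          · exact absurd h.symm (ne_of_gt hva)
          · have := (List.pairwise_cons.mp hp).1 v h
            omega
        omega
      subst hav
      rw [List.count_cons_self] at hc
      have hp' := (List.pairwise_cons.mp hp).2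
      have hge' : ∀ y ∈ t, a ≤ y := (List.pairwise_cons.mp hp).1
      rw [List.take_succ_cons, List.replicate_succ]
      congr 1
      exact ih t hp' hge' (by omega)

-- in a sorted list, a count ≥ 4 forces a run of four consecutive equal entries
theorem run_of_count (l : List Int) (v : Int) (hp : l.Pairwise (· ≤ ·))
    (hc : 4 ≤ l.count v) : ∃ j, j + 3 < l.length ∧ RunAt l j := by
  induction l with
  | nil => simp at hc
  | cons a t ih =>
    by_cases hav : a = v
    · subst hav
      have hge : ∀ y ∈ a :: t, a ≤ y := by
        intro y hy
        rcases List.mem_cons.mp hy with h | h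
        · omega
        · exact (List.pairwise_cons.mp hp).1 y h
      have htake := take_eq_replicate_of_count 4 (a :: t) a hp hge hc
      have hlen : 4 ≤ (a :: t).length := le_trans hc (List.count_le_length)
      refine ⟨0, by omega, ?_, ?_, ?_⟩ <;>
      · have hg : ∀ i, i < 4 → (a :: t).getD i 0 = a := by
          intro i hi
          have h1 : (a :: t).getD i 0 = ((a :: t).take 4).getD i 0 := by
            rw [List.getD_eq_getElem _ 0 (by omega),
                List.getD_eq_getElem _ 0 (by rw [List.length_take]; omega)]
            rw [List.getElem_take]
          rw [h1, htake,
            List.getD_eq_getElem _ 0 (by simp only [List.length_replicate]; omega)]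
          exact List.getElem_replicate _
        simp only [Nat.zero_add]
        rw [hg _ (by omega), hg _ (by omega)]
    · have hct : 4 ≤ t.count v := by
        rw [List.count_cons_of_ne hav] at hc
        exact hc
      obtain ⟨j, hb, e1, e2, e3⟩ := ih (List.pairwise_cons.mp hp).2 hct
      refine ⟨j + 1, by simp; omega, ?_, ?_, ?_⟩ <;>
        simp only [List.getD_cons_succ] <;> assumption

-- ===== VERDICT (by name: the statement is the Claim_ definition above) =====
theorem is_quadruple_spec : Claim_equal_is_quadruple := by
  intro arr _
  unfold Spec_is_quadruple is_quadruple is_quadruple_alt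
  set l := PySem.List.sorted arr (fun x => x) false with hl
  have hperm : l.Perm arr := PySem.List.sorted_perm arr (fun x => x) false
  have hcount : ∀ v, l.count v = arr.count v := fun v => hperm.count_eq v
  have hpw : l.Pairwise (· ≤ ·) := PySem.List.sorted_pairwise arr (fun x => x)
  have hB := countLoopB_eq_one arr PySem.Dict.empty
    (by intro v; rw [PySem.Dict.getD_empty]; omega)
  simp only [PySem.Dict.getD_empty, Int.zero_add] at hB
  have hBiff : countLoopB arr PySem.Dict.empty = 1 ↔ ∃ v, 4 ≤ arr.count v := by
    rw [hB]
    constructor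
    · rintro ⟨v, hv⟩; exact ⟨v, by exact_mod_cast hv⟩
    · rintro ⟨v, hv⟩; exact ⟨v, by exact_mod_cast hv⟩
  by_cases hlen : l.length < 4
  · rw [if_pos hlen]
    rcases countLoopB_zero_or_one arr PySem.Dict.empty with h0 | h1
    · rw [h0]
    · exfalso
      obtain ⟨v, hv⟩ := hBiff.mp h1
      have : arr.count v ≤ arr.length := List.count_le_length
      have hle : l.length = arr.length := hperm.length_eq
      omega
  · rw [if_neg hlen]
    have hA := isQuadLoopA_eq_one l 0 1 (le_refl 1) (by omega) (by intro k hk hk2; omega)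
    simp only [Nat.zero_add, Nat.cast_one] at hA
    have hAiff : isQuadLoopA l 1 1 = 1 ↔ ∃ v, 4 ≤ arr.count v := by
      rw [hA]
      constructor
      · rintro ⟨j, _, hb, hr⟩
        obtain ⟨v, hv⟩ := count_of_run l j hb hr
        exact ⟨v, by rw [← hcount v]; exact hv⟩
      · rintro ⟨v, hv⟩
        obtain ⟨j, hb, hr⟩ := run_of_count l v hpw (by rw [hcount v]; exact hv)
        exact ⟨j, Nat.zero_le j, hb, hr⟩
    rcases isQuadLoopA_zero_or_one l 1 1 with hA0 | hA1
    · rcases countLoopB_zero_or_one arr PySem.Dict.empty with hB0 | hB1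
      · rw [hA0, hB0]
      · exact absurd (hAiff.mpr (hBiff.mp hB1)) (by rw [hA0]; decide)
    · rw [hA1, (hBiff.mpr (hAiff.mp hA1))]
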